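-- pv_equiv track=rewrite | github.com/daedalus/libciphers | src/libciphers/__init__.py | section_key_dec
-- ===== SOURCE A (Python) =====
-- import string
--
-- A = string.ascii_uppercase
--
-- def let2n(c):
--     """Letter to number (A=0, B=1, ..., Z=25)"""
--     return ord(c.upper()) - 65 if c.upper() in A else -1
--
-- def n2let(n):
--     """Number to letter (0=A, 1=B, ..., 25=Z)"""
--     return chr((n % 26) + 65)
--
-- def section_key_dec(ct, keys, section_sizes):
--     """Different keys for different sections"""
--     result = []
--     sec_idx = 0
--     for i, c in enumerate(ct):
--         if c in A:
--             pos_in_sec = (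
--                 sum(section_sizes[: sec_idx + 1])
--                 if i >= sum(section_sizes[: sec_idx + 1])
--                 else i - sum(section_sizes[:sec_idx])
--             )
--             if i >= sum(section_sizes[: sec_idx + 1]):
--                 sec_idx = min(sec_idx + 1, len(keys) - 1)
--             key = keys[sec_idx % len(keys)]
--             k = let2n(key[pos_in_sec % len(key)])
--             shift = (k + i) % 26
--             result.append(n2let((let2n(c) - shift) % 26))
--         else:
--             result.append(c)
--     return "".join(result)
-- ===== SOURCE B (Python) =====
-- import string
--
-- A = string.ascii_uppercase
--
-- def let2n(c):
--     """Letter to number (A=0, B=1, ..., Z=25)"""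
--     return ord(c.upper()) - 65 if c.upper() in A else -1
--
-- def n2let(n):
--     """Number to letter (0=A, 1=B, ..., 25=Z)"""
--     return chr((n % 26) + 65)
--
-- def section_key_dec(ct, keys, section_sizes):
--     """Different keys for different sections — single pass with running
--     prefix sums of section_sizes instead of re-summing slices per character."""
--     n_sizes = len(section_sizes)
--     out = []
--     sec_idx = 0
--     s0 = 0                                   # sum(section_sizes[:sec_idx])
--     s1 = section_sizes[0] if n_sizes else 0  # sum(section_sizes[:sec_idx+1])
--     for i, c in enumerate(ct):
--         if c in A:
--             if i >= s1:
--                 pos = s1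
--                 if sec_idx < len(keys) - 1:
--                     sec_idx += 1
--                     s0 = s1
--                     s1 = s0 + (section_sizes[sec_idx] if sec_idx < n_sizes else 0)
--             else:
--                 pos = i - s0
--             key = keys[sec_idx]
--             k = let2n(key[pos % len(key)])
--             out.append(n2let(let2n(c) - (k + i)))
--         else:
--             out.append(c)
--     return "".join(out)
-- ===== Notes on version B (the rewrite author's own statement) =====
-- stated objective: alternative
-- what changed: B maintains running prefix sums s0/s1 of section_sizes, updated in O(1) when the section index advances, instead of re-summing section_sizes[:sec_idx] and section_sizes[:sec_idx+1] by slicing for every character, and indexes keys[sec_idx] directly since sec_idx is kept in range.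
-- outside the precondition, e.g. on section_key_dec('A', ['B', ''], [3]): A returns 'Z', B returns 'Z'
import Mathlib
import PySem

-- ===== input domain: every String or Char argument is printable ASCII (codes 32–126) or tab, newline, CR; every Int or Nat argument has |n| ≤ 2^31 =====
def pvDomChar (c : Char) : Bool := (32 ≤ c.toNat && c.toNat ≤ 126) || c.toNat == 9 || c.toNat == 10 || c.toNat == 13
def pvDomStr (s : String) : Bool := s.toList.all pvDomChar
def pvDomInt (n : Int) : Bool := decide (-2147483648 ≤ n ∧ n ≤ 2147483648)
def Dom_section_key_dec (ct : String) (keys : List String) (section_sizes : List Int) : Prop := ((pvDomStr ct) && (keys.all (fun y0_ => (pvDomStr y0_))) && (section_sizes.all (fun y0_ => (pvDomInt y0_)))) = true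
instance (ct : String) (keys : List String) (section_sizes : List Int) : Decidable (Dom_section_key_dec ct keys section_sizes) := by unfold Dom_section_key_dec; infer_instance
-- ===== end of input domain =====

-- B replaces A's per-character re-summing of section_sizes slices by running prefix
-- sums carried through the loop; objective: alternative (different bookkeeping, same result).

-- ===== PORT A =====

-- A = string.ascii_uppercase
def pyAscUpper : List Char :=
  ['A','B','C','D','E','F','G','H','I','J','K','L','M','N','O','P','Q','R','S','T','U','V','W','X','Y','Z']

-- let2n(c): ord(c.upper()) - 65 if c.upper() in A else -1
def pyLet2n (c : Char) : Int :=
  let u := PySem.Chars.upperChar c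
  if pyAscUpper.contains u then (u.toNat : Int) - 65 else -1

-- n2let(n): chr((n % 26) + 65)
def pyN2let (n : Int) : Char := Char.ofNat ((PySem.Int.mod n 26).toNat + 65)

-- one iteration of A's loop body; state = (result, sec_idx)
def skdStepA (keys : List String) (sizes : List Int) (st : List Char × Int)
    (ic : Int × Char) : List Char × Int :=
  let i := ic.1; let c := ic.2
  if pyAscUpper.contains c then
    let s1 := (PySem.List.slice sizes none (some (st.2 + 1))).sum
    let s0 := (PySem.List.slice sizes none (some st.2)).sum
    let pos := if i ≥ s1 then s1 else i - s0
    let secIdx := if i ≥ s1 then min (st.2 + 1) ((keys.length : Int) - 1) else st.2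
    let key := (PySem.List.pyGetD keys (PySem.Int.mod secIdx (keys.length : Int)) "").toList
    let k := pyLet2n (PySem.List.pyGetD key (PySem.Int.mod pos (key.length : Int)) ' ')
    let shift := PySem.Int.mod (k + i) 26
    (st.1 ++ [pyN2let (PySem.Int.mod (pyLet2n c - shift) 26)], secIdx)
  else (st.1 ++ [c], st.2)

def section_key_dec (ct : String) (keys : List String) (section_sizes : List Int) : String :=
  String.ofList
    (((PySem.List.enumerate ct.toList 0).foldl (skdStepA keys section_sizes) ([], 0)).1)

-- ===== PORT B =====

-- one iteration of B's loop body; state = (out, sec_idx, s0, s1)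
def skdStepB (keys : List String) (sizes : List Int) (st : List Char × Int × Int × Int)
    (ic : Int × Char) : List Char × Int × Int × Int :=
  let i := ic.1; let c := ic.2
  let j := st.2.1; let s0 := st.2.2.1; let s1 := st.2.2.2
  if pyAscUpper.contains c then
    let r :=  -- (pos, sec_idx, s0, s1) after the two nested ifs
      if i ≥ s1 then
        if j < (keys.length : Int) - 1 then
          (s1, j + 1, s1, s1 + (if j + 1 < (sizes.length : Int) then PySem.List.pyGetD sizes (j + 1) 0 else 0))
        else (s1, j, s0, s1)
      else (i - s0, j, s0, s1)
    let key := (PySem.List.pyGetD keys r.2.1 "").toList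
    let k := pyLet2n (PySem.List.pyGetD key (PySem.Int.mod r.1 (key.length : Int)) ' ')
    (st.1 ++ [pyN2let (pyLet2n c - (k + i))], r.2)
  else (st.1 ++ [c], j, s0, s1)

def section_key_dec_alt (ct : String) (keys : List String) (section_sizes : List Int) : String :=
  let s1init : Int := if section_sizes.length = 0 then 0 else PySem.List.pyGetD section_sizes 0 0
  String.ofList
    (((PySem.List.enumerate ct.toList 0).foldl (skdStepB keys section_sizes)
        ([], 0, 0, s1init)).1)

-- ===== PRECONDITION & SPEC =====
-- Pre_ excludes the inputs on which A may raise: a ciphertext containing an uppercase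
-- letter combined with an empty keys list (ZeroDivisionError) or an empty key string
-- (ZeroDivisionError on len(key)); for simplicity it requires ALL keys nonempty even
-- when A happens never to reach the empty one (see cites).
def Pre_section_key_dec (ct : String) (keys : List String) (section_sizes : List Int) : Prop :=
  ct.toList.any (fun c => pyAscUpper.contains c) = true → (keys ≠ [] ∧ ∀ k ∈ keys, k.toList ≠ [])
instance (ct : String) (keys : List String) (section_sizes : List Int) : Decidable (Pre_section_key_dec ct keys section_sizes) := by unfold Pre_section_key_dec; infer_instance

def pvWitness_section_key_dec : String × List String × List Int := ("AB c", ["KY"], [2])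

def Spec_section_key_dec (ct : String) (keys : List String) (section_sizes : List Int) (out : String) : Prop := out = section_key_dec_alt ct keys section_sizes
instance (ct : String) (keys : List String) (section_sizes : List Int) (out : String) : Decidable (Spec_section_key_dec ct keys section_sizes out) := by unfold Spec_section_key_dec; infer_instance

-- ===== CLAIM (what is proved, stated in full; the proofs are below) =====
def Claim_equal_section_key_dec : Prop := ∀ (ct : String) (keys : List String) (section_sizes : List Int), Dom_section_key_dec ct keys section_sizes → Pre_section_key_dec ct keys section_sizes → Spec_section_key_dec ct keys section_sizes (section_key_dec ct keys section_sizes)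

-- ===== LEMMAS AND PROOFS =====

-- prefix-sum characterisation: taking one more element adds getD (or nothing past the end)
theorem sum_take_succ (xs : List Int) (n : Nat) :
    (xs.take (n + 1)).sum = (xs.take n).sum + (if (n : Int) < (xs.length : Int) then xs.getD n 0 else 0) := by
  by_cases h : n < xs.length
  · rw [List.take_add_one]
    simp [List.getD, h]
  · have h1 : xs.take (n + 1) = xs := List.take_of_length_le (by omega)
    have h2 : xs.take n = xs := List.take_of_length_le (by omega)
    have h3 : ¬ ((n : Int) < (xs.length : Int)) := by omega
    rw [h1, h2, if_neg h3]; omega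

-- core invariant lemma: with sec_idx in range and (s0, s1) the prefix sums, B's fold
-- tracks A's fold exactly
theorem pyN2let_fold (x y : Int) :
    pyN2let (PySem.Int.mod (x - PySem.Int.mod y 26) 26) = pyN2let (x - y) := by
  have h : (0:Int) < 26 := by norm_num
  unfold pyN2let
  simp only [PySem.Int.mod_eq_emod_of_pos h]
  congr 2
  omega

theorem fold_eq (keys : List String) (sizes : List Int)
    (hk : 0 < (keys.length : Int)) :
    ∀ (xs : List Char) (s : Int) (acc : List Char) (j : Int),
      0 ≤ j → j < (keys.length : Int) →
      (PySem.List.enumerate xs s).foldl (skdStepB keys sizes)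
          (acc, j, (sizes.take j.toNat).sum, (sizes.take (j.toNat + 1)).sum)
        = (let rA := (PySem.List.enumerate xs s).foldl (skdStepA keys sizes) (acc, j)
           (rA.1, rA.2, (sizes.take rA.2.toNat).sum, (sizes.take (rA.2.toNat + 1)).sum))
      ∧ 0 ≤ ((PySem.List.enumerate xs s).foldl (skdStepA keys sizes) (acc, j)).2
      ∧ ((PySem.List.enumerate xs s).foldl (skdStepA keys sizes) (acc, j)).2 < (keys.length : Int) := by
  intro xs
  induction xs with
  | nil => intro s acc j h0 h1; simp [PySem.List.enumerate]; exact ⟨h0, h1⟩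
  | cons c xs ih =>
    intro s acc j h0 h1
    rw [PySem.List.enumerate_cons]
    simp only [List.foldl_cons]
    by_cases hc : pyAscUpper.contains c = true
    · -- uppercase letter: both loops transform the state in lockstep
      have hsl1 : PySem.List.slice sizes none (some (j + 1)) = sizes.take (j.toNat + 1) := by
        rw [PySem.List.slice_to _ (by omega)]
        congr 1
        omega
      have hsl0 : PySem.List.slice sizes none (some j) = sizes.take j.toNat := by
        rw [PySem.List.slice_to _ h0]
      by_cases hge : s ≥ (sizes.take (j.toNat + 1)).sum
      · by_cases hadv : j < (keys.length : Int) - 1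
        · -- advance to section j+1
          have hmin : min (j + 1) ((keys.length : Int) - 1) = j + 1 := by omega
          have hmod : PySem.Int.mod (j + 1) (keys.length : Int) = j + 1 := by
            rw [PySem.Int.mod_eq_emod_of_pos hk]; exact Int.emod_eq_of_lt (by omega) (by omega)
          have htn : (j + 1).toNat = j.toNat + 1 := by omega
          have hget : (if j + 1 < (sizes.length : Int) then PySem.List.pyGetD sizes (j + 1) 0 else 0)
              = (if ((j.toNat + 1 : Nat) : Int) < (sizes.length : Int) then sizes.getD (j.toNat + 1) 0 else 0) := by
            have hj1 : (j + 1) = ((j.toNat + 1 : Nat) : Int) := by omega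
            rw [hj1, PySem.List.pyGetD_natCast]
          have hA : skdStepA keys sizes (acc, j) (s, c)
              = (acc ++ [pyN2let (PySem.Int.mod (pyLet2n c -
                    PySem.Int.mod (pyLet2n (PySem.List.pyGetD
                      (PySem.List.pyGetD keys (j + 1) "").toList
                      (PySem.Int.mod ((sizes.take (j.toNat + 1)).sum)
                        (((PySem.List.pyGetD keys (j + 1) "").toList.length : Int))) ' ') + s) 26) 26)],
                 j + 1) := by
            simp only [skdStepA, hc, if_true, hsl1, hsl0, if_pos hge, hmin, hmod, ge_iff_le]
          have hB : skdStepB keys sizes (acc, j, (sizes.take j.toNat).sum, (sizes.take (j.toNat + 1)).sum) (s, c)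
              = (acc ++ [pyN2let (PySem.Int.mod (pyLet2n c -
                    PySem.Int.mod (pyLet2n (PySem.List.pyGetD
                      (PySem.List.pyGetD keys (j + 1) "").toList
                      (PySem.Int.mod ((sizes.take (j.toNat + 1)).sum)
                        (((PySem.List.pyGetD keys (j + 1) "").toList.length : Int))) ' ') + s) 26) 26)],
                 j + 1, (sizes.take ((j + 1).toNat)).sum, (sizes.take ((j + 1).toNat + 1)).sum) := by
            simp only [skdStepB, hc, if_true, if_pos hge, if_pos hadv, ge_iff_le]
            rw [pyN2let_fold, htn, hget, sum_take_succ sizes (j.toNat + 1)]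
          rw [hA, hB]
          exact ih (s + 1) _ (j + 1) (by omega) (by omega)
        · -- capped: sec_idx stays at len(keys)-1 = j
          have hmin : min (j + 1) ((keys.length : Int) - 1) = j := by omega
          have hmod : PySem.Int.mod j (keys.length : Int) = j := by
            rw [PySem.Int.mod_eq_emod_of_pos hk]; exact Int.emod_eq_of_lt (by omega) (by omega)
          have hA : skdStepA keys sizes (acc, j) (s, c)
              = (acc ++ [pyN2let (PySem.Int.mod (pyLet2n c -
                    PySem.Int.mod (pyLet2n (PySem.List.pyGetD
                      (PySem.List.pyGetD keys j "").toList
                      (PySem.Int.mod ((sizes.take (j.toNat + 1)).sum)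
                        (((PySem.List.pyGetD keys j "").toList.length : Int))) ' ') + s) 26) 26)],
                 j) := by
            simp only [skdStepA, hc, if_true, hsl1, hsl0, if_pos hge, hmin, hmod, ge_iff_le]
          have hB : skdStepB keys sizes (acc, j, (sizes.take j.toNat).sum, (sizes.take (j.toNat + 1)).sum) (s, c)
              = (acc ++ [pyN2let (PySem.Int.mod (pyLet2n c -
                    PySem.Int.mod (pyLet2n (PySem.List.pyGetD
                      (PySem.List.pyGetD keys j "").toList
                      (PySem.Int.mod ((sizes.take (j.toNat + 1)).sum)
                        (((PySem.List.pyGetD keys j "").toList.length : Int))) ' ') + s) 26) 26)],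
                 j, (sizes.take j.toNat).sum, (sizes.take (j.toNat + 1)).sum) := by
            simp only [skdStepB, hc, if_true, if_pos hge, if_neg hadv, ge_iff_le]
            rw [pyN2let_fold]
          rw [hA, hB]
          exact ih (s + 1) _ j h0 h1
      · -- inside the current section
        have hmod : PySem.Int.mod j (keys.length : Int) = j := by
          rw [PySem.Int.mod_eq_emod_of_pos hk]; exact Int.emod_eq_of_lt (by omega) (by omega)
        have hA : skdStepA keys sizes (acc, j) (s, c)
            = (acc ++ [pyN2let (PySem.Int.mod (pyLet2n c -
                  PySem.Int.mod (pyLet2n (PySem.List.pyGetD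
                    (PySem.List.pyGetD keys j "").toList
                    (PySem.Int.mod (s - (sizes.take j.toNat).sum)
                      (((PySem.List.pyGetD keys j "").toList.length : Int))) ' ') + s) 26) 26)],
               j) := by
          simp only [skdStepA, hc, if_true, hsl1, hsl0, if_neg hge, hmod, ge_iff_le]
        have hB : skdStepB keys sizes (acc, j, (sizes.take j.toNat).sum, (sizes.take (j.toNat + 1)).sum) (s, c)
            = (acc ++ [pyN2let (PySem.Int.mod (pyLet2n c -
                  PySem.Int.mod (pyLet2n (PySem.List.pyGetD
                    (PySem.List.pyGetD keys j "").toList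
                    (PySem.Int.mod (s - (sizes.take j.toNat).sum)
                      (((PySem.List.pyGetD keys j "").toList.length : Int))) ' ') + s) 26) 26)],
               j, (sizes.take j.toNat).sum, (sizes.take (j.toNat + 1)).sum) := by
          simp only [skdStepB, hc, if_true, if_neg hge, ge_iff_le]
          rw [pyN2let_fold]
        rw [hA, hB]
        exact ih (s + 1) _ j h0 h1
    · -- not a letter: append unchanged
      have hc' : pyAscUpper.contains c = false := by simpa using hc
      simp only [skdStepA, skdStepB, hc', Bool.false_eq_true, if_false]
      exact ih (s + 1) (acc ++ [c]) j h0 h1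

-- the loops ignore the state entirely when no character is an uppercase letter
theorem fold_no_letter (keys : List String) (sizes : List Int) :
    ∀ (xs : List Char) (s : Int) (accA : List Char) (jA : Int)
      (accB : List Char) (stB : Int × Int × Int),
      (∀ c ∈ xs, pyAscUpper.contains c = false) →
      ((PySem.List.enumerate xs s).foldl (skdStepA keys sizes) (accA, jA)).1 = accA ++ xs
      ∧ ((PySem.List.enumerate xs s).foldl (skdStepB keys sizes) (accB, stB)).1 = accB ++ xs := by
  intro xs
  induction xs with
  | nil => intro s accA jA accB stB _; simp [PySem.List.enumerate]
  | cons c xs ih =>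
    intro s accA jA accB stB h
    have hc : pyAscUpper.contains c = false := h c (List.mem_cons_self)
    rw [PySem.List.enumerate_cons]
    simp only [List.foldl_cons, skdStepA, skdStepB, hc, Bool.false_eq_true, if_false]
    have := ih (s + 1) (accA ++ [c]) jA (accB ++ [c]) stB
      (fun d hd => h d (List.mem_cons_of_mem _ hd))
    simpa using this

-- ===== VERDICT (by name: the statement is the Claim_ definition above) =====
theorem section_key_dec_spec : Claim_equal_section_key_dec := by
  intro ct keys sizes _ hpre
  unfold Spec_section_key_dec
  simp only [section_key_dec, section_key_dec_alt]
  by_cases hlet : ct.toList.any (fun c => pyAscUpper.contains c) = true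
  · obtain ⟨hk, _⟩ := hpre hlet
    have hk' : 0 < (keys.length : Int) := by
      have := List.length_pos_iff.mpr hk
      omega
    have hinit : (if sizes.length = 0 then (0:Int) else PySem.List.pyGetD sizes 0 0)
        = (sizes.take 1).sum := by
      cases sizes with
      | nil => simp
      | cons x xs => simp [PySem.List.pyGetD_zero_cons]
    have h := (fold_eq keys sizes hk' ct.toList 0 [] 0 (le_refl 0) hk').1
    simp only [Int.toNat_zero, List.take_zero, List.sum_nil, Nat.zero_add] at h
    rw [hinit, h]
  · have hnone : ∀ c ∈ ct.toList, pyAscUpper.contains c = false := by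
      intro c hc
      by_contra hne
      exact hlet (List.any_eq_true.mpr ⟨c, hc, by simpa using hne⟩)
    have h := fold_no_letter keys sizes ct.toList 0 [] 0 []
      (0, 0, if sizes.length = 0 then (0:Int) else PySem.List.pyGetD sizes 0 0) hnone
    rcases h with ⟨hA, hB⟩
    have hA' : ((PySem.List.enumerate ct.toList 0).foldl (skdStepA keys sizes) ([], 0)).1 = ct.toList := by
      simpa using hA
    have hB' : ((PySem.List.enumerate ct.toList 0).foldl (skdStepB keys sizes)
        ([], 0, 0, if sizes.length = 0 then (0:Int) else PySem.List.pyGetD sizes 0 0)).1 = ct.toList := by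
      simpa using hB
    rw [hA', hB']
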